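-- pv_equiv track=rewrite | github.com/finlaymcnally/RecipeImporter | cookimport/plugins/text.py | _split_by_line_indices
-- ===== SOURCE A (Python) =====
-- from typing import TYPE_CHECKING, Any, Callable, Dict, List, Optional, Tuple
--
-- def _split_by_line_indices(
--
--     text: str,
--     start_lines: list[int],
-- ) -> List[Tuple[str, Tuple[int, int]]]:
--     lines = text.splitlines(keepends=True)
--     if not lines:
--         return []
--     line_starts: list[int] = []
--     pos = 0
--     for line in lines:
--         line_starts.append(pos)
--         pos += len(line)
--
--     chunks: list[tuple[str, tuple[int, int]]] = []
--     starts = sorted(set(start_lines))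
--     for idx, start_line in enumerate(starts):
--         if start_line < 0 or start_line >= len(lines):
--             continue
--         end_line = starts[idx + 1] if idx + 1 < len(starts) else len(lines)
--         start_char = line_starts[start_line]
--         end_char = line_starts[end_line] if end_line < len(lines) else len(text)
--         chunk = text[start_char:end_char].strip()
--         if chunk:
--             chunks.append((chunk, (start_line + 1, end_line)))
--     return chunks
-- ===== SOURCE B (Python) =====
-- def _split_by_line_indices(text, start_lines):
--     lines = text.splitlines(keepends=True)
--     if not lines:
--         return []
--     starts = sorted(set(start_lines))
--     chunks = []
--     for start_line, end_line in zip(starts, starts[1:] + [len(lines)]):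
--         if 0 <= start_line < len(lines):
--             chunk = "".join(lines[start_line:end_line]).strip()
--             if chunk:
--                 chunks.append((chunk, (start_line + 1, end_line)))
--     return chunks
-- ===== Notes on version B (the rewrite author's own statement) =====
-- stated objective: simpler
-- what changed: B drops A's character-offset table (line_starts prefix sums and text[a:b] slicing) and instead zips each sorted start with its successor and joins the keepends lines of the slice directly.
import Mathlib
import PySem

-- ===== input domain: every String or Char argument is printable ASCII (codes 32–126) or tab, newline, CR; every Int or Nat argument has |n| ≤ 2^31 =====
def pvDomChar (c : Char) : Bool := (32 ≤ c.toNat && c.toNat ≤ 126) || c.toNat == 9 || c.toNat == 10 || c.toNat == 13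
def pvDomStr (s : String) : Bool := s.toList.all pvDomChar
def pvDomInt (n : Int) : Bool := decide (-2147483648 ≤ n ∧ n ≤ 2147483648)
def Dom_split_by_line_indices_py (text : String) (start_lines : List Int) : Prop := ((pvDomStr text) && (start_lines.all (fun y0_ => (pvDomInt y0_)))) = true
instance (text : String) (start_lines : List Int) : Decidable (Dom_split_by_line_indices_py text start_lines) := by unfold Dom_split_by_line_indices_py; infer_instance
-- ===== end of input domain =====

-- B replaces A's character-offset table (line_starts + text[a:b] slicing) by zipping each start with its
-- successor and joining the keepends lines directly; objective: simpler (no offset bookkeeping), not faster.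

-- ===== PORT A =====
-- shared helper: text.splitlines(keepends=True), ported by hand; exact on the Dom alphabet, where the
-- only Python line boundaries are '\n', '\r' and '\r\n' (no \v/\f/\x1c…\x1e/\x85/unicode separators).
def pvSplitKeep : List Char → List (List Char)
  | [] => []
  | '\r' :: '\n' :: rest => ['\r', '\n'] :: pvSplitKeep rest
  | '\r' :: rest => ['\r'] :: pvSplitKeep rest
  | '\n' :: rest => ['\n'] :: pvSplitKeep rest
  | c :: rest =>
    match pvSplitKeep rest with
    | [] => [[c]]
    | l :: ls => (c :: l) :: ls

-- loop body of A's `for idx, start_line in enumerate(starts)` (guards as in the Python; pyGetD is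
-- Python indexing, in range under the same guards the Python has)
def pvBodyA (cs : List Char) (lines : List (List Char)) (line_starts starts : List Int)
    (chunks : List (String × (Int × Int))) (ise : Int × Int) : List (String × (Int × Int)) :=
  let idx := ise.1
  let start_line := ise.2
  if start_line < 0 ∨ (lines.length : Int) ≤ start_line then chunks
  else
    let end_line : Int := if idx + 1 < (starts.length : Int) then PySem.List.pyGetD starts (idx + 1) 0 else (lines.length : Int)
    let start_char : Int := PySem.List.pyGetD line_starts start_line 0
    let end_char : Int := if end_line < (lines.length : Int) then PySem.List.pyGetD line_starts end_line 0 else (cs.length : Int)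
    let chunk := PySem.Chars.strip (PySem.List.slice cs (some start_char) (some end_char))
    if chunk ≠ [] then chunks ++ [(String.ofList chunk, (start_line + 1, end_line))] else chunks

def split_by_line_indices_py (text : String) (start_lines : List Int) : List (String × (Int × Int)) :=
  let cs := text.toList
  let lines := pvSplitKeep cs
  if lines = [] then []
  else
    let line_starts := (lines.foldl (fun (st : List Int × Int) line => (st.1 ++ [st.2], st.2 + (line.length : Int))) (([] : List Int), (0 : Int))).1
    let starts := PySem.List.sorted (PySem.Set.ofList start_lines) (fun x => x) false
    (PySem.List.enumerate starts).foldl (pvBodyA cs lines line_starts starts) []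

-- ===== PORT B =====
-- loop body of B's `for start_line, end_line in zip(starts, starts[1:] + [len(lines)])`
def pvBodyB (lines : List (List Char)) (chunks : List (String × (Int × Int))) (se : Int × Int) :
    List (String × (Int × Int)) :=
  let start_line := se.1
  let end_line := se.2
  if 0 ≤ start_line ∧ start_line < (lines.length : Int) then
    let chunk := PySem.Chars.strip (PySem.Chars.join [] (PySem.List.slice lines (some start_line) (some end_line)))
    if chunk ≠ [] then chunks ++ [(String.ofList chunk, (start_line + 1, end_line))] else chunks
  else chunks

def split_by_line_indices_py_alt (text : String) (start_lines : List Int) : List (String × (Int × Int)) :=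
  let lines := pvSplitKeep text.toList
  if lines = [] then []
  else
    let starts := PySem.List.sorted (PySem.Set.ofList start_lines) (fun x => x) false
    (starts.zip (PySem.List.slice starts (some 1) none ++ [(lines.length : Int)])).foldl (pvBodyB lines) []

-- ===== PRECONDITION & SPEC =====
def Spec_split_by_line_indices_py (text : String) (start_lines : List Int) (out : List (String × (Int × Int))) : Prop := out = split_by_line_indices_py_alt text start_lines
instance (text : String) (start_lines : List Int) (out : List (String × (Int × Int))) : Decidable (Spec_split_by_line_indices_py text start_lines out) := by unfold Spec_split_by_line_indices_py; infer_instance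

-- ===== CLAIM (what is proved, stated in full; the proofs are below) =====
def Claim_equal_split_by_line_indices_py : Prop := ∀ (text : String) (start_lines : List Int), Dom_split_by_line_indices_py text start_lines → Spec_split_by_line_indices_py text start_lines (split_by_line_indices_py text start_lines)

-- ===== LEMMAS AND PROOFS =====

-- splitlines(keepends=True) pieces concatenate back to the text
theorem pvSplitKeep_flatten (cs : List Char) : (pvSplitKeep cs).flatten = cs := by
  fun_induction pvSplitKeep cs <;> simp_all

-- character offset of line k (prefix sum of keepends line lengths)
def pvOff (lines : List (List Char)) (k : Nat) : Nat := ((lines.take k).map List.length).sum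

theorem pv_join_nil (l : List (List Char)) : PySem.Chars.join [] l = l.flatten := by
  show (List.intersperse ([] : List Char) l).flatten = l.flatten
  induction l with
  | nil => rfl
  | cons a t ih => cases t <;> simp_all [List.intersperse]

-- A's line_starts fold, characterized
theorem pv_ls_spec : ∀ (lines : List (List Char)) (acc : List Int) (n : Int),
    (lines.foldl (fun (st : List Int × Int) line => (st.1 ++ [st.2], st.2 + (line.length : Int))) (acc, n)).1
      = acc ++ (List.range lines.length).map (fun i => n + (pvOff lines i : Int)) := by
  intro lines
  induction lines with
  | nil => simp
  | cons l t ih =>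
    intro acc n
    simp only [List.foldl_cons, List.length_cons, List.range_succ_eq_map, List.map_cons,
      List.map_map]
    rw [ih]
    simp [pvOff, Function.comp]
    intro a ha
    ring

theorem pv_ls_getD (lines : List (List Char)) (j : Int) (h0 : 0 ≤ j) (hj : j < (lines.length : Int)) :
    PySem.List.pyGetD (lines.foldl (fun (st : List Int × Int) line => (st.1 ++ [st.2], st.2 + (line.length : Int))) (([] : List Int), (0 : Int))).1 j 0
      = (pvOff lines j.toNat : Int) := by
  rw [pv_ls_spec, PySem.List.pyGetD_of_nonneg _ _ h0]
  have hjn : j.toNat < lines.length := by omega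
  rw [List.getD_eq_getElem?_getD]
  simp [hjn]

-- the chunk A cuts by character offsets is the chunk B cuts by joining keepends lines
theorem pv_chunk_eq (lines : List (List Char)) (s : Nat) (e : Int)
    (hs : s < lines.length) (hse : (s : Int) < e) :
    PySem.List.slice lines.flatten (some (pvOff lines s : Int))
        (some (if e < (lines.length : Int) then (pvOff lines e.toNat : Int) else (lines.flatten.length : Int)))
      = (PySem.List.slice lines (some (s : Int)) (some e)).flatten := by
  have he0 : 0 ≤ e := by omega
  have heN : e = (e.toNat : Int) := by omega
  set eN : Nat := min e.toNat lines.length with heNdef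
  have hsN : s < eN := by omega
  have hend : (if e < (lines.length : Int) then (pvOff lines e.toNat : Int) else (lines.flatten.length : Int)) = (pvOff lines eN : Int) := by
    split
    · congr 2; omega
    · have : eN = lines.length := by omega
      rw [this]
      simp [pvOff, List.length_flatten]
  rw [hend, heN]
  rw [PySem.List.slice_natCast, PySem.List.slice_natCast]
  have h1 : List.take (pvOff lines eN - pvOff lines s) (List.drop (pvOff lines s) lines.flatten)
      = List.drop (pvOff lines s) (List.take (pvOff lines eN) lines.flatten) := by
    rw [List.drop_take]
  rw [h1]
  have h2 : List.take (pvOff lines eN) lines.flatten = (lines.take eN).flatten := by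
    have := List.take_sum_flatten lines eN
    simpa [pvOff, List.map_take] using this
  rw [h2]
  have h3 : pvOff lines s = ((List.take s ((lines.take eN).map List.length)).sum) := by
    simp [pvOff, List.map_take, List.take_take, Nat.min_eq_left (le_of_lt hsN)]
  rw [h3, List.drop_sum_flatten]
  have h4 : List.take (e.toNat - s) (List.drop s lines) = List.drop s (List.take e.toNat lines) := by
    rw [List.drop_take]
  rw [h4]
  have h5 : List.take e.toNat lines = List.take eN lines := by
    rcases Nat.lt_or_ge lines.length e.toNat with h | h
    · rw [List.take_of_length_le (le_of_lt h), List.take_of_length_le (by omega)]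
    · simp [heNdef, Nat.min_eq_left h]
  rw [h5]

-- one iteration of A's loop = one iteration of B's loop, once A's end_line expression equals B's pair
theorem pv_body_eq (cs : List Char) (lines : List (List Char)) (hcs : lines.flatten = cs)
    (line_starts starts : List Int)
    (hls : ∀ j : Int, 0 ≤ j → j < (lines.length : Int) → PySem.List.pyGetD line_starts j 0 = (pvOff lines j.toNat : Int))
    (i : Int) (s e : Int)
    (hend : (if i + 1 < (starts.length : Int) then PySem.List.pyGetD starts (i + 1) 0 else (lines.length : Int)) = e)
    (hse : s < e ∨ (lines.length : Int) ≤ s ∨ s < 0) (acc : List (String × (Int × Int))) :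
    pvBodyA cs lines line_starts starts acc (i, s) = pvBodyB lines acc (s, e) := by
  unfold pvBodyA pvBodyB
  simp only
  by_cases hr : s < 0 ∨ (lines.length : Int) ≤ s
  · have hnb : ¬(0 ≤ s ∧ s < (lines.length : Int)) := by omega
    rw [if_pos hr, if_neg hnb]
  · have hb : 0 ≤ s ∧ s < (lines.length : Int) := by omega
    have hse' : s < e := by omega
    obtain ⟨sn, rfl⟩ : ∃ n : Nat, s = (n : Int) := ⟨s.toNat, by omega⟩
    rw [if_neg hr, if_pos hb, hend, hls _ hb.1 hb.2]
    have hch : (if e < (lines.length : Int) then PySem.List.pyGetD line_starts e 0 else (cs.length : Int))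
        = (if e < (lines.length : Int) then (pvOff lines e.toNat : Int) else (lines.flatten.length : Int)) := by
      by_cases hel : e < (lines.length : Int)
      · rw [if_pos hel, if_pos hel, hls e (by omega) hel]
      · rw [if_neg hel, if_neg hel, hcs]
    rw [hch, Int.toNat_natCast, ← hcs,
      pv_chunk_eq lines sn e (by exact_mod_cast hb.2) hse', pv_join_nil]

theorem pv_fold_eq (cs : List Char) (lines : List (List Char)) (hcs : lines.flatten = cs)
    (line_starts starts : List Int)
    (hls : ∀ j : Int, 0 ≤ j → j < (lines.length : Int) → PySem.List.pyGetD line_starts j 0 = (pvOff lines j.toNat : Int)) :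
    ∀ (st : List Int) (i : Nat) (acc : List (String × (Int × Int))),
      starts.drop i = st → st.Pairwise (· < ·) →
      (PySem.List.enumerate st i).foldl (pvBodyA cs lines line_starts starts) acc
        = (st.zip (st.drop 1 ++ [(lines.length : Int)])).foldl (pvBodyB lines) acc := by
  intro st
  induction st with
  | nil => intro i acc _ _; rfl
  | cons s rest ih =>
    intro i acc hdrop hpw
    have hld : (starts.drop i).length = starts.length - i := List.length_drop
    rw [hdrop] at hld
    simp only [List.length_cons] at hld
    have hlen : starts.length = i + rest.length + 1 := by omega
    rw [PySem.List.enumerate_cons]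
    cases rest with
    | nil =>
      simp only [List.drop_succ_cons, List.drop_nil, List.nil_append, List.zip_cons_cons,
        List.zip_nil_right, List.foldl_cons, List.foldl_nil]
      have hnend : ¬ ((i : Int) + 1 < (starts.length : Int)) := by
        simp only [List.length_nil] at hlen
        rw [hlen]; push_cast; omega
      rw [pv_body_eq cs lines hcs line_starts starts hls i s (lines.length : Int)
        (if_neg hnend) (by omega) acc]
      simp [PySem.List.enumerate]
    | cons r t =>
      have hiend : ((i : Int) + 1 < (starts.length : Int)) := by
        simp only [List.length_cons] at hlen
        rw [hlen]; push_cast; omega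
      have hdrop1 : starts.drop (i + 1) = r :: t := by
        have h1 : List.drop 1 (starts.drop i) = List.drop 1 (s :: r :: t) := by rw [hdrop]
        simpa [List.drop_drop] using h1
      have hget : PySem.List.pyGetD starts ((i : Int) + 1) 0 = r := by
        rw [show ((i : Int) + 1) = ((i + 1 : Nat) : Int) by push_cast; ring,
          PySem.List.pyGetD_natCast, List.getD_eq_getElem?_getD]
        have h0 : (starts.drop (i + 1))[0]? = some r := by rw [hdrop1]; rfl
        rw [List.getElem?_drop] at h0
        simp only [Nat.add_zero] at h0
        simp [h0]
      have hsr : s < r := (List.pairwise_cons.mp hpw).1 r (by simp)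
      simp only [List.drop_succ_cons, List.foldl_cons]
      rw [pv_body_eq cs lines hcs line_starts starts hls i s r
        (by rw [if_pos hiend, hget]) (Or.inl hsr) acc]
      rw [show ((i : Int) + 1) = ((i + 1 : Nat) : Int) by push_cast; ring]
      exact ih (i + 1) (pvBodyB lines acc (s, r)) hdrop1 (List.pairwise_cons.mp hpw).2

-- ===== VERDICT (by name: the statement is the Claim_ definition above) =====
theorem split_by_line_indices_py_spec : Claim_equal_split_by_line_indices_py := by
  intro text start_lines _
  unfold Spec_split_by_line_indices_py split_by_line_indices_py split_by_line_indices_py_alt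
  simp only
  split
  · rfl
  · rw [PySem.List.slice_from _ (by norm_num)]
    exact pv_fold_eq text.toList (pvSplitKeep text.toList) (pvSplitKeep_flatten _)
      _ _ (fun j h0 hj => pv_ls_getD _ j h0 hj) _ 0 [] (by simp)
      (PySem.List.sorted_ofList_pairwise_lt start_lines)
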